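-- pv_equiv track=rewrite | github.com/raman325/lock_code_manager | custom_components/lock_code_manager/pin_generator.py | is_unsafe_pin
-- ===== SOURCE A (Python) =====
-- COMMON_WEAK_PINS_4: frozenset[str] = frozenset(
--     {
--         "0000",
--         "1004",
--         "1010",
--         "1111",
--         "1122",
--         "1212",
--         "1234",
--         "1313",
--         "2000",
--         "2001",
--         "2222",
--         "3333",
--         "4321",
--         "4444",
--         "5555",
--         "6666",
--         "6969",
--         "7777",
--         "8888",
--         "9999",
--     }
-- )
--
-- def is_unsafe_pin(pin: str) -> bool:
--     """
--     Return True if the PIN matches a known weak/unsafe pattern.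
--
--     Rejects all-same digits, fully sequential ascending or descending
--     (with wrap at 9-to-0 / 0-to-9), repeating sub-sequence patterns
--     (1212, 123123, etc.), and for 4-digit PINs the common-PIN list
--     derived from public leak studies.
--     """
--     n = len(pin)
--     if n == 0:
--         return True
--
--     # All same digits.
--     if len(set(pin)) == 1:
--         return True
--
--     # Repeating sub-sequence: for some k that divides n, the first k digits
--     # repeated n/k times equals the pin (k < n so we don't trivially match
--     # the whole pin against itself).
--     for k in range(1, n):
--         if n % k == 0 and pin[:k] * (n // k) == pin:
--             return True
--
--     # Fully sequential ascending or descending, with wrap at 9-to-0 / 0-to-9.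
--     digits = [int(c) for c in pin]
--     asc = all((digits[i] + 1) % 10 == digits[i + 1] for i in range(n - 1))
--     desc = all((digits[i] - 1) % 10 == digits[i + 1] for i in range(n - 1))
--     if asc or desc:
--         return True
--
--     # Common 4-digit weak PINs (statistically the most-guessed values).
--     return n == 4 and pin in COMMON_WEAK_PINS_4
-- ===== SOURCE B (Python) =====
-- COMMON_WEAK_PINS_4: frozenset[str] = frozenset(
--     {
--         "0000", "1004", "1010", "1111", "1122", "1212", "1234", "1313",
--         "2000", "2001", "2222", "3333", "4321", "4444", "5555", "6666",
--         "6969", "7777", "8888", "9999",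
--     }
-- )
--
--
-- def _cyclic_step(ds, step):
--     """True if each digit is the previous one plus `step`, modulo 10."""
--     return all((a + step) % 10 == b for a, b in zip(ds, ds[1:]))
--
--
-- def is_unsafe_pin(pin: str) -> bool:
--     n = len(pin)
--     if n <= 1:
--         return True
--     # Periodicity (covers all-same digits and every repeating block): a string
--     # is a repetition of a proper block iff it occurs inside its own doubling
--     # with both endpoints trimmed -- one substring search, no divisor trial.
--     if pin in (pin + pin)[1:-1]:
--         return True
--     digits = [int(c) for c in pin]
--     if _cyclic_step(digits, 1) or _cyclic_step(digits, -1):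
--         return True
--     return n == 4 and pin in COMMON_WEAK_PINS_4
-- ===== Notes on version B (the rewrite author's own statement) =====
-- stated objective: alternative
-- what changed: The all-same set() check and the divisor trial loop are replaced by the single string-doubling primitivity test `pin in (pin+pin)[1:-1]` (plus a length<=1 early return), and the two index-loop sequential checks become one zip-pairs helper called with step +1 and -1.
import Mathlib
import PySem

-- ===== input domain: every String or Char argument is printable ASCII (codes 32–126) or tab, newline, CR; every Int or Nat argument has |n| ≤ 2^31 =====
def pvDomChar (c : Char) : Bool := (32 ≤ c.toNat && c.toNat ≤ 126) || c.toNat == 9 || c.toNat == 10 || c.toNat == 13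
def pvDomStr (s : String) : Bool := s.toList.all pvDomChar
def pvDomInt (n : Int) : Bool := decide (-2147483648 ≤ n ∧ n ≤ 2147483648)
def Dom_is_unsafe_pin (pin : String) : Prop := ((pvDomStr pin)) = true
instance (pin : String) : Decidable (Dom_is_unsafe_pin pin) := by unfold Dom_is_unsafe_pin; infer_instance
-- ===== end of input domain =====

-- B replaces A's all-same-set check and divisor loop by the single string-doubling
-- primitivity test `pin in (pin+pin)[1:-1]` and checks the two cyclic runs by one
-- zip-pairs helper (objective: alternative algorithm for the periodicity core).

-- ===== PORT A =====

def pvCommonWeak4 : PySem.Set String := PySem.Set.ofList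
  ["0000", "1004", "1010", "1111", "1122", "1212", "1234", "1313",
   "2000", "2001", "2222", "3333", "4321", "4444", "5555", "6666",
   "6969", "7777", "8888", "9999"]

def is_unsafe_pin (pin : String) : Bool :=
  let l := pin.toList
  let n := l.length
  if n = 0 then true
  else if PySem.Set.len (PySem.Set.ofList l) == 1 then true
  else if (PySem.List.pyRange 1 (n : Int) 1).any (fun k =>
      PySem.Int.mod (n : Int) k == 0 &&
      ((List.replicate (PySem.Int.floordiv (n : Int) k).toNat
          (PySem.Chars.slice l none (some k))).flatten == l))
  then true
  else
    -- digits = [int(c) for c in pin]; `none` = ValueError, excluded by Pre_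
    match l.mapM (fun c => PySem.Int.ofChars? [c]) with
    | none => false
    | some ds =>
      let asc := (PySem.List.pyRange 0 ((n : Int) - 1) 1).all (fun i =>
        PySem.Int.mod (PySem.List.pyGetD ds i 0 + 1) 10 == PySem.List.pyGetD ds (i + 1) 0)
      let desc := (PySem.List.pyRange 0 ((n : Int) - 1) 1).all (fun i =>
        PySem.Int.mod (PySem.List.pyGetD ds i 0 - 1) 10 == PySem.List.pyGetD ds (i + 1) 0)
      if asc || desc then true
      else decide (n = 4) && PySem.Set.contains pvCommonWeak4 pin

-- ===== PORT B =====

def pvCyclicStep (ds : List Int) (step : Int) : Bool :=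
  (ds.zip (PySem.List.slice ds (some 1) none)).all (fun ab =>
    PySem.Int.mod (ab.1 + step) 10 == ab.2)

def is_unsafe_pin_alt (pin : String) : Bool :=
  let l := pin.toList
  let n := l.length
  if n ≤ 1 then true
  else if PySem.Chars.isIn l (PySem.Chars.slice (l ++ l) (some 1) (some (-1))) then true
  else
    -- digits = [int(c) for c in pin]; `none` = ValueError, excluded by Pre_
    match l.mapM (fun c => PySem.Int.ofChars? [c]) with
    | none => false
    | some ds =>
      if pvCyclicStep ds 1 || pvCyclicStep ds (-1) then true
      else decide (n = 4) && PySem.Set.contains pvCommonWeak4 pin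

-- ===== PRECONDITION & SPEC =====
-- Pre_ excludes exactly the inputs on which the Python raises ValueError at int(c):
-- strings containing a non-digit character that are neither of length ≤ 1 nor a
-- repetition of a proper block (both implementations raise there alike).
def Pre_is_unsafe_pin (pin : String) : Prop :=
  pin.toList.all Char.isDigit = true ∨ pin.toList.length ≤ 1 ∨
  ∃ k < pin.toList.length, 0 < k ∧ k ∣ pin.toList.length ∧
    (List.replicate (pin.toList.length / k) (pin.toList.take k)).flatten = pin.toList
instance (pin : String) : Decidable (Pre_is_unsafe_pin pin) := by
  unfold Pre_is_unsafe_pin; infer_instance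

def pvWitness_is_unsafe_pin : String := "1357"

def Spec_is_unsafe_pin (pin : String) (out : Bool) : Prop := out = is_unsafe_pin_alt pin
instance (pin : String) (out : Bool) : Decidable (Spec_is_unsafe_pin pin out) := by
  unfold Spec_is_unsafe_pin; infer_instance

-- ===== CLAIM (what is proved, stated in full; the proofs are below) =====
def Claim_equal_is_unsafe_pin : Prop :=
  ∀ (pin : String), Dom_is_unsafe_pin pin → Pre_is_unsafe_pin pin →
    Spec_is_unsafe_pin pin (is_unsafe_pin pin)

-- ===== LEMMAS AND PROOFS =====


theorem pv_getD_flatten_replicate {α : Type} (d : α) (w : List α) :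
    ∀ (m i : ℕ), i < m * w.length →
      ((List.replicate m w).flatten).getD i d = w.getD (i % w.length) d := by
  intro m
  induction m with
  | zero => intro i hi; omega
  | succ m ih =>
    intro i hi
    rw [List.replicate_succ, List.flatten_cons]
    by_cases h : i < w.length
    · rw [List.getD_append _ _ _ _ h, Nat.mod_eq_of_lt h]
    · rw [Nat.not_lt] at h
      rw [List.getD_append_right _ _ _ _ h, ih (i - w.length) (by
        have h2 : (m+1)*w.length = m*w.length + w.length := by ring
        omega), Nat.mod_eq_sub_mod h]

theorem pv_mapM_length {α β : Type} (f : α → Option β) :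
    ∀ (l : List α) (ds : List β), l.mapM f = some ds → ds.length = l.length := by
  intro l
  induction l with
  | nil => intro ds h; simp [List.mapM_nil] at h; simp [← h]
  | cons a t ih =>
    intro ds h
    rw [List.mapM_cons] at h
    cases hf : f a with
    | none => simp [hf] at h
    | some b =>
      simp [hf, bind, Option.bind] at h
      cases ht : t.mapM f with
      | none => simp [ht] at h
      | some ts => simp [ht] at h; simp [← h, ih ts ht]

theorem pv_len_flatten_replicate {α : Type} (w : List α) (m : ℕ) :
    ((List.replicate m w).flatten).length = m * w.length := by
  simp [List.length_flatten, List.map_replicate, List.sum_replicate]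

theorem pv_getD_take (l : List Char) (k j : ℕ) (hj : j < k) :
    (l.take k).getD j 'a' = l.getD j 'a' := by
  by_cases hl : j < l.length
  · rw [List.getD_eq_getElem _ _ (by simp; omega), List.getD_eq_getElem _ _ hl,
      List.getElem_take]
  · rw [Nat.not_lt] at hl
    rw [List.getD_eq_default _ _ (by simp; omega), List.getD_eq_default _ _ hl]

theorem pv_flatten_char (l : List Char) (k : ℕ) (hk : 0 < k) (hkd : k ∣ l.length) :
    (List.replicate (l.length / k) (l.take k)).flatten = l ↔
      ∀ i < l.length, l.getD i 'a' = l.getD (i % k) 'a' := by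
  by_cases h0 : l.length = 0
  · rw [List.length_eq_zero_iff] at h0
    subst h0; simp
  have hn : 0 < l.length := Nat.pos_of_ne_zero h0
  have hkn : k ≤ l.length := Nat.le_of_dvd hn hkd
  have hw : (l.take k).length = k := by simp; omega
  have hmul : (l.length / k) * k = l.length := Nat.div_mul_cancel hkd
  constructor
  · intro h i hi
    have h1 := pv_getD_flatten_replicate 'a' (l.take k) (l.length / k) i (by rw [hw, hmul]; exact hi)
    have h2 := pv_getD_flatten_replicate 'a' (l.take k) (l.length / k) (i % k)
      (by rw [hw, hmul]; exact lt_of_lt_of_le (Nat.mod_lt i hk) hkn)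
    rw [h] at h1 h2
    rw [h1, h2, hw, Nat.mod_eq_of_lt (Nat.mod_lt i hk)]
  · intro h
    have hlen : ((List.replicate (l.length / k) (l.take k)).flatten).length = l.length := by
      rw [pv_len_flatten_replicate, hw, hmul]
    apply List.ext_getElem hlen
    intro i h1 h2
    rw [← List.getD_eq_getElem _ 'a' h1, ← List.getD_eq_getElem _ 'a' h2,
      pv_getD_flatten_replicate 'a' (l.take k) (l.length / k) i (by rw [hw, hmul]; rwa [hlen] at h1),
      hw, pv_getD_take l k (i % k) (Nat.mod_lt i hk), ← h i (by rwa [hlen] at h1)]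


theorem pv_char_rotate (l : List Char) (k : ℕ) (hk : 0 < k) (hkn : k < l.length)
    (hkd : k ∣ l.length) :
    (∀ i < l.length, l.getD i 'a' = l.getD (i % k) 'a') ↔ l.rotate k = l := by
  constructor
  · intro h
    apply List.ext_getElem (by simp)
    intro i h1 h2
    rw [List.getElem_rotate]
    have hin : (i + k) % l.length < l.length := Nat.mod_lt _ (by omega)
    rw [← List.getD_eq_getElem _ 'a' hin, ← List.getD_eq_getElem _ 'a' h2,
      h _ hin, h i h2, Nat.mod_mod_of_dvd _ hkd, Nat.add_mod_right]
  · intro h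
    have hcyc : ∀ i < l.length, l.getD i 'a' = l.getD ((i + k) % l.length) 'a' := by
      intro i hi
      have h1 : i < (l.rotate k).length := by simpa using hi
      have h2 := List.getElem_rotate l k i h1
      simp only [h] at h2
      rw [List.getD_eq_getElem _ 'a' hi, List.getD_eq_getElem _ 'a' (Nat.mod_lt _ (by omega))]
      exact h2
    intro i
    induction i using Nat.strong_induction_on with
    | _ i ih =>
      intro hi
      by_cases hik : i < k
      · rw [Nat.mod_eq_of_lt hik]
      · rw [Nat.not_lt] at hik
        have hsub : i - k < l.length := by omega
        have h1 := hcyc (i - k) hsub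
        rw [Nat.sub_add_cancel hik, Nat.mod_eq_of_lt hi] at h1
        rw [← h1, ih (i - k) (by omega) hsub, Nat.mod_eq_sub_mod hik]

theorem pv_rotate_gcd (l : List Char) (p : ℕ) (hp : 0 < p) (hpn : p < l.length)
    (h : l.rotate p = l) : l.rotate (Nat.gcd p l.length) = l := by
  have hmul : ∀ a : ℕ, l.rotate (a * p) = l := by
    intro a
    induction a with
    | zero => simp
    | succ a ih =>
      have : (a + 1) * p = a * p + p := by ring
      rw [this, ← List.rotate_rotate, ih, h]
  have hg : Nat.gcd p l.length < l.length := lt_of_le_of_lt (Nat.gcd_le_left _ hp) hpn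
  obtain ⟨m, hm, hmod⟩ := Nat.exists_mul_mod_eq_gcd hg
  calc l.rotate (Nat.gcd p l.length) = l.rotate (p * m % l.length) := by rw [hmod]
    _ = l.rotate (p * m) := List.rotate_mod l (p * m)
    _ = l := by rw [Nat.mul_comm]; exact hmul m


theorem pv_seg_rotate (l : List Char) (p : ℕ) (hp : p ≤ l.length) :
    List.take l.length ((l ++ l).drop p) = List.drop p l ++ List.take p l := by
  rw [List.drop_append, Nat.sub_eq_zero_of_le hp, List.drop_zero, List.take_append,
    List.take_of_length_le (by simp)]
  congr 1
  have h2 : l.length - (List.drop p l).length = p := by simp; omega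
  rw [h2]

theorem pv_slice_interior (l : List Char) (hn : 1 ≤ l.length) :
    PySem.Chars.slice (l ++ l) (some 1) (some (-1)) =
      List.take (2 * l.length - 2) ((l ++ l).drop 1) := by
  simp [PySem.Chars.slice, PySem.List.slice]
  have h1 : min 1 (l.length + l.length) = 1 := by omega
  rw [h1]
  have h2 : l.length + l.length - 1 - 1 = 2 * l.length - 2 := by omega
  rw [h2, ← List.drop_one]

theorem pv_isIn_rotate (l : List Char) (hn : 2 ≤ l.length) :
    PySem.Chars.isIn l (PySem.Chars.slice (l ++ l) (some 1) (some (-1))) = true ↔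
      ∃ p, 0 < p ∧ p < l.length ∧ l.rotate p = l := by
  rw [PySem.Chars.isIn_iff_infix, pv_slice_interior l (by omega)]
  set n := l.length with hn'
  set I := List.take (2 * n - 2) ((l ++ l).drop 1) with hI
  have lenI : I.length = 2 * n - 2 := by simp [hI]; omega
  constructor
  · rintro ⟨s, t, hst⟩
    have hlen : s.length + (n + t.length) = 2 * n - 2 := by
      have := congrArg List.length hst
      simpa [lenI] using this
    refine ⟨s.length + 1, by omega, by omega, ?_⟩
    have htake : List.take n (I.drop s.length) = l := by
      rw [← hst, List.append_assoc, List.drop_left]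
      exact List.take_left
    rw [hI, List.drop_take, List.drop_drop, List.take_take,
      min_eq_left (by omega : n ≤ 2 * n - 2 - s.length)] at htake
    rw [List.rotate_eq_drop_append_take (by omega), ← pv_seg_rotate l _ (by omega)]
    rw [Nat.add_comm 1 s.length] at htake
    exact htake
  · rintro ⟨p, hp0, hpn, hrot⟩
    have htake : List.take n ((l ++ l).drop p) = l := by
      rw [pv_seg_rotate l p (by omega), ← List.rotate_eq_drop_append_take (by omega), hrot]
    have hpref : l <+: I.drop (p - 1) := by
      rw [List.prefix_iff_eq_take, hI, List.drop_take, List.drop_drop,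
        (by omega : 1 + (p - 1) = p), List.take_take, ← hn',
        min_eq_left (by omega : n ≤ 2 * n - 2 - (p - 1)), htake]
    exact hpref.isInfix.trans (List.drop_suffix _ _).isInfix


theorem pv_anyDiv_iff (l : List Char) :
    ((PySem.List.pyRange 1 (l.length : Int) 1).any (fun k =>
      PySem.Int.mod (l.length : Int) k == 0 &&
      ((List.replicate (PySem.Int.floordiv (l.length : Int) k).toNat
          (PySem.Chars.slice l none (some k))).flatten == l)) = true) ↔
      ∃ k, 0 < k ∧ k < l.length ∧ k ∣ l.length ∧
        (List.replicate (l.length / k) (l.take k)).flatten = l := by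
  rw [List.any_eq_true]
  constructor
  · rintro ⟨k, hk, hpred⟩
    rw [PySem.List.mem_pyRange_one] at hk
    obtain ⟨hk1, hk2⟩ := hk
    have hkeq : k = ((k.toNat : ℕ) : Int) := by omega
    simp only [Bool.and_eq_true, beq_iff_eq] at hpred
    obtain ⟨hmod, hflat⟩ := hpred
    rw [PySem.Int.mod_eq_zero_iff_dvd] at hmod
    rw [hkeq] at hmod hflat
    refine ⟨k.toNat, by omega, by omega, Int.natCast_dvd_natCast.mp hmod, ?_⟩
    rw [PySem.Int.floordiv_natCast, Int.toNat_natCast] at hflat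
    have hsl : PySem.Chars.slice l none (some ((k.toNat : ℕ) : Int)) = l.take k.toNat :=
      PySem.List.slice_to_natCast l k.toNat
    rw [hsl] at hflat
    exact hflat
  · rintro ⟨k, hk0, hkn, hkd, hflat⟩
    refine ⟨(k : Int), PySem.List.mem_pyRange_one.mpr ⟨by omega, by omega⟩, ?_⟩
    simp only [Bool.and_eq_true, beq_iff_eq]
    refine ⟨(PySem.Int.mod_eq_zero_iff_dvd _ _).mpr (Int.natCast_dvd_natCast.mpr hkd), ?_⟩
    have hsl : PySem.Chars.slice l none (some ((k : ℕ) : Int)) = l.take k :=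
      PySem.List.slice_to_natCast l k
    rw [PySem.Int.floordiv_natCast, Int.toNat_natCast, hsl]
    exact hflat

theorem pv_flatten_replicate_singleton (c : Char) :
    ∀ n : ℕ, (List.replicate n [c]).flatten = List.replicate n c := by
  intro n
  induction n with
  | zero => simp
  | succ n ih => rw [List.replicate_succ, List.flatten_cons, ih, List.replicate_succ]; rfl

theorem pv_allsame_anyDiv (l : List Char) (hn : 2 ≤ l.length)
    (h : PySem.Set.len (PySem.Set.ofList l) == 1) :
    ((PySem.List.pyRange 1 (l.length : Int) 1).any (fun k =>
      PySem.Int.mod (l.length : Int) k == 0 &&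
      ((List.replicate (PySem.Int.floordiv (l.length : Int) k).toNat
          (PySem.Chars.slice l none (some k))).flatten == l)) = true) := by
  have hlen : (PySem.Set.ofList l).length = 1 := by
    have := beq_iff_eq.mp h
    have h2 : ((PySem.Set.ofList l).length : Int) = 1 := this
    omega
  obtain ⟨c, hc⟩ := List.length_eq_one_iff.mp hlen
  have hall : ∀ x ∈ l, x = c := by
    intro x hx
    have : x ∈ PySem.Set.ofList l := (PySem.Set.mem_ofList l x).mpr hx
    rw [hc] at this
    simpa using this
  have hrep : l = List.replicate l.length c := List.eq_replicate_iff.mpr ⟨rfl, hall⟩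
  rw [pv_anyDiv_iff]
  refine ⟨1, by omega, by omega, one_dvd _, ?_⟩
  rw [Nat.div_one]
  conv_lhs => rw [hrep]
  conv_rhs => rw [hrep]
  rw [List.take_replicate, min_eq_left (by omega), List.length_replicate,
    (by rfl : List.replicate 1 c = [c]), pv_flatten_replicate_singleton]

theorem pv_run_eq (ds : List Int) (n : ℕ) (hd : ds.length = n) (s : Int) :
    ((PySem.List.pyRange 0 ((n : Int) - 1) 1).all (fun i =>
      PySem.Int.mod (PySem.List.pyGetD ds i 0 + s) 10 == PySem.List.pyGetD ds (i + 1) 0)) =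
    pvCyclicStep ds s := by
  have hA : ((PySem.List.pyRange 0 ((n : Int) - 1) 1).all (fun i =>
      PySem.Int.mod (PySem.List.pyGetD ds i 0 + s) 10 == PySem.List.pyGetD ds (i + 1) 0)) = true ↔
      ∀ j : ℕ, j + 1 < n → PySem.Int.mod (ds.getD j 0 + s) 10 = ds.getD (j + 1) 0 := by
    rw [List.all_eq_true]
    constructor
    · intro h j hj
      have hmem : ((j : ℕ) : Int) ∈ PySem.List.pyRange 0 ((n : Int) - 1) :=
        PySem.List.mem_pyRange_one.mpr ⟨by omega, by omega⟩
      have := h _ hmem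
      simp only [beq_iff_eq] at this
      rwa [PySem.List.pyGetD_natCast, (by push_cast; ring : ((j : ℕ) : Int) + 1 = ((j + 1 : ℕ) : Int)),
        PySem.List.pyGetD_natCast] at this
    · intro h i hmem
      rw [PySem.List.mem_pyRange_one] at hmem
      obtain ⟨h0, h1⟩ := hmem
      have hj : i = ((i.toNat : ℕ) : Int) := by omega
      simp only [beq_iff_eq]
      rw [hj, PySem.List.pyGetD_natCast,
        (by push_cast; ring : ((i.toNat : ℕ) : Int) + 1 = ((i.toNat + 1 : ℕ) : Int)),
        PySem.List.pyGetD_natCast]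
      exact h i.toNat (by omega)
  have hB : pvCyclicStep ds s = true ↔
      ∀ j : ℕ, j + 1 < n → PySem.Int.mod (ds.getD j 0 + s) 10 = ds.getD (j + 1) 0 := by
    unfold pvCyclicStep
    rw [PySem.List.slice_from_one, List.all_eq_true]
    constructor
    · intro h j hj
      have hjz : j < (ds.zip ds.tail).length := by simp [List.length_zip]; omega
      have hmem := List.getElem_mem hjz
      have := h _ hmem
      rw [List.getElem_zip, List.getElem_tail] at this
      simp only [beq_iff_eq] at this
      rwa [List.getD_eq_getElem _ 0 (by omega), List.getD_eq_getElem _ 0 (by omega)]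
    · intro h ab hab
      obtain ⟨j, hjz, rfl⟩ := List.mem_iff_getElem.mp hab
      have hjn : j + 1 < n := by simp [List.length_zip] at hjz; omega
      have := h j hjn
      rw [List.getElem_zip, List.getElem_tail]
      simp only [beq_iff_eq]
      rwa [List.getD_eq_getElem _ 0 (by omega), List.getD_eq_getElem _ 0 (by omega)] at this
  rw [Bool.eq_iff_iff, hA, hB]

theorem pv_anyDiv_eq_isIn (l : List Char) (hn : 2 ≤ l.length) :
    ((PySem.List.pyRange 1 (l.length : Int) 1).any (fun k =>
      PySem.Int.mod (l.length : Int) k == 0 &&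
      ((List.replicate (PySem.Int.floordiv (l.length : Int) k).toNat
          (PySem.Chars.slice l none (some k))).flatten == l))) =
    PySem.Chars.isIn l (PySem.Chars.slice (l ++ l) (some 1) (some (-1))) := by
  rw [Bool.eq_iff_iff, pv_anyDiv_iff, pv_isIn_rotate l hn]
  constructor
  · rintro ⟨k, hk0, hkn, hkd, hflat⟩
    exact ⟨k, hk0, hkn,
      (pv_char_rotate l k hk0 hkn hkd).mp ((pv_flatten_char l k hk0 hkd).mp hflat)⟩
  · rintro ⟨p, hp0, hpn, hrot⟩
    have hg0 : 0 < Nat.gcd p l.length := Nat.gcd_pos_of_pos_left _ hp0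
    have hgd : Nat.gcd p l.length ∣ l.length := Nat.gcd_dvd_right _ _
    have hgn : Nat.gcd p l.length < l.length := lt_of_le_of_lt (Nat.gcd_le_left _ hp0) hpn
    exact ⟨_, hg0, hgn, hgd, (pv_flatten_char _ _ hg0 hgd).mpr
      ((pv_char_rotate _ _ hg0 hgn hgd).mpr (pv_rotate_gcd l p hp0 hpn hrot))⟩

-- ===== VERDICT (by name: the statement is the Claim_ definition above) =====
theorem is_unsafe_pin_spec : Claim_equal_is_unsafe_pin := by
  intro pin _ _
  unfold Spec_is_unsafe_pin
  dsimp only [is_unsafe_pin, is_unsafe_pin_alt]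
  set l := pin.toList with hl
  by_cases h0 : l.length = 0
  · simp [h0]
  by_cases h1 : l.length = 1
  · obtain ⟨c, hc⟩ := List.length_eq_one_iff.mp h1
    rw [hc]
    rfl
  have hn : 2 ≤ l.length := by omega
  rw [if_neg h0, if_neg (by omega : ¬ l.length ≤ 1)]
  by_cases hsame : (PySem.Set.len (PySem.Set.ofList l) == 1) = true
  · rw [if_pos hsame, ← pv_anyDiv_eq_isIn l hn, if_pos (pv_allsame_anyDiv l hn hsame)]
  · rw [if_neg hsame, pv_anyDiv_eq_isIn l hn]
    by_cases hIn :
        PySem.Chars.isIn l (PySem.Chars.slice (l ++ l) (some 1) (some (-1))) = true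
    · rw [if_pos hIn, if_pos hIn]
    · rw [if_neg hIn, if_neg hIn]
      cases hm : l.mapM (fun c => PySem.Int.ofChars? [c]) with
      | none => rfl
      | some ds =>
        have hd : ds.length = l.length := pv_mapM_length _ l ds hm
        dsimp only
        rw [pv_run_eq ds l.length hd 1]
        have hdesc : ((PySem.List.pyRange 0 ((l.length : Int) - 1) 1).all (fun i =>
            PySem.Int.mod (PySem.List.pyGetD ds i 0 - 1) 10 ==
              PySem.List.pyGetD ds (i + 1) 0)) = pvCyclicStep ds (-1) := by
          rw [← pv_run_eq ds l.length hd (-1)]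
          simp only [sub_eq_add_neg]
        rw [hdesc]
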